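-- pv_equiv track=rewrite | github.com/Xavilien/word-game | article2/preprocessing.py | remove_prefix
-- ===== SOURCE A (Python) =====
-- import string
--
-- def search(dictionary, subword):
--     return list(filter(lambda x: x.startswith(subword), dictionary))
--
-- def search_remaining_letters(dictionary, subword):
--     return list(map(lambda x: x[len(subword):], search(dictionary, subword)))
--
-- def remove_prefix(dictionary, prefix):
--     if len(dictionary) == 0:
--         return []
--     if dictionary[0] == "":
--         return [prefix]
--
--     new_dictionary = []
--     for i in string.ascii_lowercase:
--         new_dictionary += remove_prefix(search_remaining_letters(dictionary, i), prefix+i)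
--     return new_dictionary
-- ===== SOURCE B (Python) =====
-- import string
--
-- def remove_prefix(dictionary, prefix):
--     # Iterative DFS over an explicit stack; children found by one-pass
--     # bucketing on the first letter instead of per-letter filter scans.
--     result = []
--     stack = [(dictionary, prefix)]
--     while stack:
--         node, p = stack.pop()
--         if not node:
--             continue
--         if node[0] == "":
--             result.append(p)
--             continue
--         buckets = {}
--         for w in node:
--             if w and 'a' <= w[0] <= 'z':
--                 buckets.setdefault(w[0], []).append(w[1:])
--         for ch in sorted(buckets, reverse=True):
--             stack.append((buckets[ch], p + ch))
--     return result
-- ===== Notes on version B (the rewrite author's own statement) =====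
-- stated objective: alternative
-- what changed: Replaced A's recursion by an explicit-stack iterative DFS whose children per node are found by a single bucketing pass over the node (dict keyed by first letter) instead of A's 26 per-letter filter-and-slice scans and 26 recursive calls per node.
import Mathlib
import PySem

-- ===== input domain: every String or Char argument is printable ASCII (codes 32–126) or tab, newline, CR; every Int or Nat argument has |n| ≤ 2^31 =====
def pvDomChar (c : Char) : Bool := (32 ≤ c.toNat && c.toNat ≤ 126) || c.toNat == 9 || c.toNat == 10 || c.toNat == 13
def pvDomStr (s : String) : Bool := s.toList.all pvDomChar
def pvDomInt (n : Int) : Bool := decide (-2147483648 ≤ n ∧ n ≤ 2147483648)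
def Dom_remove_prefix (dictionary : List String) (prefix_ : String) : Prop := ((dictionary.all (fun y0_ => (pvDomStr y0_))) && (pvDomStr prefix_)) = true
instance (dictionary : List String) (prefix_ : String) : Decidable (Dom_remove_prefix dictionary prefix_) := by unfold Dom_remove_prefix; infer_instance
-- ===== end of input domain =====

-- B replaces A's recursion by an explicit-stack DFS and A's 26 per-letter filter scans per
-- node by one bucketing pass over the node (objective: alternative algorithm, same result).

-- measure helpers (cited by the ports' decreasing_by)
def pvLen (w : String) : Nat := w.length
def pvMeasure (d : List String) : Nat := (d.map (fun w => w.length + 1)).sum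

theorem pv_slice_one_length (w : String) :
    (PySem.Str.slice w (some 1) none).length = w.length - 1 := by
  rw [← String.length_toList, PySem.Str.toList_slice, PySem.Chars.slice,
    PySem.List.slice_from _ (by norm_num)]
  simp

theorem pv_sum_le_measure (d : List String) : (d.map pvLen).sum ≤ pvMeasure d := by
  induction d with
  | nil => simp [pvMeasure]
  | cons w t ih => simp [pvMeasure, pvLen] at *; omega

theorem pv_sum_lt_measure (d : List String) (hd : d ≠ []) : (d.map pvLen).sum < pvMeasure d := by
  cases d with
  | nil => exact absurd rfl hd
  | cons w t =>
    have := pv_sum_le_measure t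
    simp [pvMeasure, pvLen] at *; omega

theorem pv_sum_map_filter_le (d : List String) (q : String → Bool) :
    ((d.filter q).map pvLen).sum ≤ (d.map pvLen).sum := by
  refine List.Sublist.sum_le_sum ?_ ?_
  · exact List.Sublist.map pvLen (List.filter_sublist (p := q) (l := d))
  · intro a _; exact Nat.zero_le a

theorem pvMeasure_cons (w : String) (t : List String) :
    pvMeasure (w :: t) = w.length + 1 + pvMeasure t := by simp [pvMeasure]

theorem pvMeasure_map_slice (l : List String) (h : ∀ w ∈ l, w ≠ "") :
    pvMeasure (l.map (fun x => PySem.Str.slice x (some 1) none)) = (l.map pvLen).sum := by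
  induction l with
  | nil => simp [pvMeasure]
  | cons w t ih =>
    have hw : w.length ≠ 0 := by
      have := h w (by simp)
      simpa [String.length_eq_zero_iff] using this
    have ht := ih (fun x hx => h x (by simp [hx]))
    rw [List.map_cons, pvMeasure_cons, ht, pv_slice_one_length, List.map_cons, List.sum_cons]
    have : pvLen w = w.length := rfl
    omega

-- ===== PORT A =====
def search (dictionary : List String) (subword : String) : List String :=
  dictionary.filter (fun x => PySem.Str.startswith x subword)

def search_remaining_letters (dictionary : List String) (subword : String) : List String :=
  (search dictionary subword).map (fun x => PySem.Str.slice x (some (PySem.Str.len subword)) none)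

theorem pv_startswith_nonempty (w : String) (c : Char)
    (h : PySem.Str.startswith w (String.singleton c) = true) : w ≠ "" := by
  rw [PySem.Str.startswith_eq] at h
  rw [PySem.Chars.startswith_iff] at h
  intro he
  subst he
  simp at h

theorem pv_srl_singleton_eq (d : List String) (c : Char) :
    search_remaining_letters d (String.singleton c)
      = (search d (String.singleton c)).map (fun x => PySem.Str.slice x (some 1) none) := by
  simp [search_remaining_letters]

theorem pvMeasure_srl_lt (d : List String) (hd : d ≠ []) (c : Char) :
    pvMeasure (search_remaining_letters d (String.singleton c)) < pvMeasure d := by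
  rw [pv_srl_singleton_eq]
  rw [pvMeasure_map_slice _ (fun w hw => pv_startswith_nonempty w c (by
        simpa [search] using (List.mem_filter.mp hw).2))]
  calc ((search d (String.singleton c)).map pvLen).sum
      ≤ (d.map pvLen).sum := pv_sum_map_filter_le d _
    _ < pvMeasure d := pv_sum_lt_measure d hd

mutual
def remove_prefix (dictionary : List String) (prefix_ : String) : List String :=
  if h : dictionary.length = 0 then []
  else if dictionary.headI = "" then [prefix_]
  else rpGo dictionary (by simpa using h) prefix_ "abcdefghijklmnopqrstuvwxyz".toList
termination_by (pvMeasure dictionary, 27)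
decreasing_by
  exact Prod.Lex.right _ (by decide)

def rpGo (dictionary : List String) (h : dictionary ≠ []) (prefix_ : String) (letters : List Char) : List String :=
  match letters with
  | [] => []
  | c :: rest =>
      remove_prefix (search_remaining_letters dictionary (String.singleton c)) (prefix_ ++ String.singleton c)
        ++ rpGo dictionary h prefix_ rest
termination_by (pvMeasure dictionary, letters.length)
decreasing_by
  · exact Prod.Lex.left _ _ (pvMeasure_srl_lt dictionary h c)
  · exact Prod.Lex.right _ (by simp)
end

-- ===== PORT B =====
def pvPred (w : String) : Bool :=
  match w.toList with
  | [] => false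
  | c :: _ => decide ('a' ≤ c) && decide (c ≤ 'z')

def pvHeadC (w : String) : Char := w.toList.headI

def pvBucketStep (d : PySem.Dict Char (List String)) (w : String) : PySem.Dict Char (List String) :=
  if pvPred w then d.modify (pvHeadC w) [] (fun l => l ++ [PySem.Str.slice w (some 1) none]) else d

def pvBuckets (node : List String) : PySem.Dict Char (List String) :=
  node.foldl pvBucketStep PySem.Dict.empty

-- filter characterisation of one bucket (cited by bLoop's decreasing_by)
def pvChild (node : List String) (c : Char) : List String :=
  (node.filter (fun w => pvPred w && (pvHeadC w == c))).map (fun x => PySem.Str.slice x (some 1) none)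

theorem pvBuckets_getD_aux (node : List String) (d : PySem.Dict Char (List String)) (c : Char) :
    (node.foldl pvBucketStep d).getD c [] = d.getD c [] ++ pvChild node c := by
  induction node generalizing d with
  | nil => simp [pvChild]
  | cons w t ih =>
    show (t.foldl pvBucketStep (pvBucketStep d w)).getD c [] = _
    rw [ih]
    by_cases hp : pvPred w
    · by_cases hc : pvHeadC w = c
      · subst hc
        simp [pvBucketStep, hp, pvChild, PySem.Dict.getD_modify_self]
      · have hne : c ≠ pvHeadC w := fun he => hc he.symm
        show (pvBucketStep d w).getD c [] ++ pvChild t c = _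
        rw [show pvBucketStep d w
              = d.modify (pvHeadC w) [] (fun l => l ++ [PySem.Str.slice w (some 1) none]) by
            simp [pvBucketStep, hp]]
        rw [PySem.Dict.getD_modify_of_ne d _ _ hne]
        unfold pvChild
        rw [List.filter_cons_of_neg (by simp [hc])]
    · simp [pvBucketStep, hp, pvChild]

theorem pvBuckets_getD (node : List String) (c : Char) :
    (pvBuckets node).getD c [] = pvChild node c := by
  rw [pvBuckets, pvBuckets_getD_aux]
  simp [PySem.Dict.getD_empty]

theorem pvBuckets_keys_nodup_aux (node : List String) (d : PySem.Dict Char (List String))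
    (h : d.keys.Nodup) : (node.foldl pvBucketStep d).keys.Nodup := by
  induction node generalizing d with
  | nil => exact h
  | cons w t ih =>
    show (t.foldl pvBucketStep (pvBucketStep d w)).keys.Nodup
    apply ih
    by_cases hp : pvPred w
    · simp only [pvBucketStep, hp, if_pos]
      rw [PySem.Dict.keys_modify]
      exact PySem.Dict.nodup_keys_insert _ _ _ h
    · simpa [pvBucketStep, hp] using h

theorem pvBuckets_keys_nodup (node : List String) : (pvBuckets node).keys.Nodup :=
  pvBuckets_keys_nodup_aux node _ (by simp [PySem.Dict.keys_empty])

theorem pv_pred_nonempty (w : String) (h : pvPred w = true) : w ≠ "" := by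
  intro he; subst he; simp [pvPred] at h

theorem pvMeasure_pvChild_eq (node : List String) (c : Char) :
    pvMeasure (pvChild node c)
      = ((node.filter (fun w => pvPred w && (pvHeadC w == c))).map pvLen).sum := by
  rw [pvChild, pvMeasure_map_slice]
  intro w hw
  have h2 := (List.mem_filter.mp hw).2
  simp only [Bool.and_eq_true] at h2
  exact pv_pred_nonempty w h2.1

theorem pv_indicator_sum_le (ks : List Char) (hnd : ks.Nodup) (a : Char) (v : Nat) :
    (ks.map (fun c => if a = c then v else 0)).sum ≤ v := by
  induction ks with
  | nil => simp
  | cons k t ih =>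
    have hnd' := (List.nodup_cons.mp hnd)
    by_cases hk : a = k
    · subst hk
      have : (t.map (fun c => if a = c then v else 0)).sum = 0 := by
        apply List.sum_eq_zero
        intro x hx
        obtain ⟨c, hc, rfl⟩ := List.mem_map.mp hx
        have : a ≠ c := fun he => hnd'.1 (he ▸ hc)
        simp [this]
      simp [this]
    · simpa [hk] using ih hnd'.2

theorem pv_sum_child_le (ks : List Char) (hnd : ks.Nodup) (node : List String) :
    (ks.map (fun c => pvMeasure (pvChild node c))).sum ≤ (node.map pvLen).sum := by
  have key : ∀ nd : List String,
      (ks.map (fun c => ((nd.filter (fun w => pvPred w && (pvHeadC w == c))).map pvLen).sum)).sum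
        ≤ (nd.map pvLen).sum := by
    intro nd
    induction nd with
    | nil => simp
    | cons w t ih =>
      have hsplit : ∀ c : Char,
          ((List.filter (fun w => pvPred w && (pvHeadC w == c)) (w :: t)).map pvLen).sum
            = (if pvPred w && (pvHeadC w == c) then pvLen w else 0)
              + ((t.filter (fun w => pvPred w && (pvHeadC w == c))).map pvLen).sum := by
        intro c
        by_cases hc : (pvPred w && (pvHeadC w == c)) = true
        · simp [hc]
        · simp [hc]
      calc (ks.map (fun c => ((List.filter (fun w => pvPred w && (pvHeadC w == c)) (w :: t)).map pvLen).sum)).sum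
          = (ks.map (fun c => (if pvPred w && (pvHeadC w == c) then pvLen w else 0)
              + ((t.filter (fun w => pvPred w && (pvHeadC w == c))).map pvLen).sum)).sum := by
            congr 1; exact List.map_congr_left (fun c _ => hsplit c)
        _ = (ks.map (fun c => if pvPred w && (pvHeadC w == c) then pvLen w else 0)).sum
              + (ks.map (fun c => ((t.filter (fun w => pvPred w && (pvHeadC w == c))).map pvLen).sum)).sum :=
            List.sum_map_add
        _ ≤ pvLen w + (t.map pvLen).sum := by
            apply Nat.add_le_add _ ih
            by_cases hp : pvPred w
            · have : ∀ c : Char, (if pvPred w && (pvHeadC w == c) then pvLen w else 0)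
                  = (if pvHeadC w = c then pvLen w else 0) := by
                intro c; simp [hp]
              rw [List.map_congr_left (fun c _ => this c)]
              exact pv_indicator_sum_le ks hnd _ _
            · simp [hp]
        _ = ((w :: t).map pvLen).sum := by simp
  calc (ks.map (fun c => pvMeasure (pvChild node c))).sum
      = (ks.map (fun c => ((node.filter (fun w => pvPred w && (pvHeadC w == c))).map pvLen).sum)).sum := by
        congr 1; exact List.map_congr_left (fun c _ => pvMeasure_pvChild_eq node c)
    _ ≤ (node.map pvLen).sum := key node

def pvStackMeasure (st : List (List String × String)) : Nat :=
  (st.map (fun q => pvMeasure q.1)).sum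

theorem pvStackMeasure_foldl_cons (l : List Char) (f : Char → List String × String)
    (rest : List (List String × String)) :
    pvStackMeasure (l.foldl (fun st c => f c :: st) rest)
      = (l.map (fun c => pvMeasure (f c).1)).sum + pvStackMeasure rest := by
  induction l generalizing rest with
  | nil => simp
  | cons c t ih =>
    show pvStackMeasure (t.foldl _ (f c :: rest)) = _
    rw [ih]
    simp [pvStackMeasure]
    omega

theorem pvPushMeasure_lt (node : List String) (h : node ≠ []) :
    ((PySem.List.sorted (pvBuckets node).keys (fun x => x) true).map
        (fun c => pvMeasure ((pvBuckets node).getD c []))).sum < pvMeasure node := by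
  have hperm : (PySem.List.sorted (pvBuckets node).keys (fun x => x) true).Perm (pvBuckets node).keys :=
    PySem.List.sorted_perm _ _ _
  have h1 : ((PySem.List.sorted (pvBuckets node).keys (fun x => x) true).map
        (fun c => pvMeasure ((pvBuckets node).getD c []))).sum
      = ((pvBuckets node).keys.map (fun c => pvMeasure ((pvBuckets node).getD c []))).sum :=
    (hperm.map _).sum_eq
  rw [h1]
  have h2 : ((pvBuckets node).keys.map (fun c => pvMeasure ((pvBuckets node).getD c []))).sum
      = ((pvBuckets node).keys.map (fun c => pvMeasure (pvChild node c))).sum := by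
    congr 1; exact List.map_congr_left (fun c _ => by rw [pvBuckets_getD])
  rw [h2]
  calc _ ≤ (node.map pvLen).sum := pv_sum_child_le _ (pvBuckets_keys_nodup node) node
    _ < pvMeasure node := pv_sum_lt_measure node h

def bLoop (stack : List (List String × String)) (acc : List String) : List String :=
  match stack with
  | [] => acc
  | (node, p) :: rest =>
    if _hn : node = [] then bLoop rest acc
    else if node.headI = "" then bLoop rest (acc ++ [p])
    else
      bLoop ((PySem.List.sorted (pvBuckets node).keys (fun x => x) true).foldl
               (fun st c => ((pvBuckets node).getD c [], p ++ String.singleton c) :: st) rest) acc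
termination_by (pvStackMeasure stack, stack.length)
decreasing_by
  · apply Prod.Lex.right' <;> simp [pvStackMeasure, _hn]
  · have : 0 < pvMeasure node := by
      cases node with
      | nil => exact absurd rfl _hn
      | cons w t => simp [pvMeasure]
    apply Prod.Lex.left
    simp [pvStackMeasure]; omega
  · apply Prod.Lex.left
    rw [pvStackMeasure_foldl_cons]
    have := pvPushMeasure_lt node _hn
    simp [pvStackMeasure] at *
    omega

def remove_prefix_alt (dictionary : List String) (prefix_ : String) : List String :=
  bLoop [(dictionary, prefix_)] []

-- ===== PRECONDITION & SPEC =====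
def Spec_remove_prefix (dictionary : List String) (prefix_ : String) (out : List String) : Prop := out = remove_prefix_alt dictionary prefix_
instance (dictionary : List String) (prefix_ : String) (out : List String) : Decidable (Spec_remove_prefix dictionary prefix_ out) := by unfold Spec_remove_prefix; infer_instance

-- ===== CLAIM (what is proved, stated in full; the proofs are below) =====
def Claim_equal_remove_prefix : Prop := ∀ (dictionary : List String) (prefix_ : String), Dom_remove_prefix dictionary prefix_ → Spec_remove_prefix dictionary prefix_ (remove_prefix dictionary prefix_)

-- ===== LEMMAS AND PROOFS =====

theorem pvMeasure_pvChild_lt (node : List String) (hd : node ≠ []) (c : Char) :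
    pvMeasure (pvChild node c) < pvMeasure node := by
  rw [pvMeasure_pvChild_eq]
  calc _ ≤ (node.map pvLen).sum := pv_sum_map_filter_le node _
    _ < pvMeasure node := pv_sum_lt_measure node hd

theorem pv_mem_keys_aux (node : List String) (d : PySem.Dict Char (List String)) (c : Char) :
    c ∈ (node.foldl pvBucketStep d).keys ↔
      c ∈ d.keys ∨ ∃ w ∈ node, (pvPred w && (pvHeadC w == c)) = true := by
  induction node generalizing d with
  | nil => simp
  | cons w t ih =>
    show c ∈ (t.foldl pvBucketStep (pvBucketStep d w)).keys ↔ _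
    rw [ih]
    have hm : c ∈ (pvBucketStep d w).keys ↔ c ∈ d.keys ∨ (pvPred w && (pvHeadC w == c)) = true := by
      by_cases hp : pvPred w
      · rw [show pvBucketStep d w
              = d.modify (pvHeadC w) [] (fun l => l ++ [PySem.Str.slice w (some 1) none]) by
            simp [pvBucketStep, hp]]
        rw [← PySem.Dict.contains_iff_mem_keys, PySem.Dict.contains_modify,
          ← PySem.Dict.contains_iff_mem_keys]
        simp only [hp, Bool.true_and, Bool.or_eq_true, beq_iff_eq]
        constructor
        · rintro (rfl | hmem)
          · exact Or.inr rfl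
          · exact Or.inl hmem
        · rintro (hmem | he)
          · exact Or.inr hmem
          · exact Or.inl he.symm
      · simp [pvBucketStep, hp]
    rw [hm]
    constructor
    · rintro ((h | h) | h)
      · exact Or.inl h
      · exact Or.inr ⟨w, by simp, h⟩
      · obtain ⟨x, hx, hxx⟩ := h
        exact Or.inr ⟨x, by simp [hx], hxx⟩
    · rintro (h | ⟨x, hx, hxx⟩)
      · exact Or.inl (Or.inl h)
      · rcases List.mem_cons.mp hx with rfl | hx
        · exact Or.inl (Or.inr hxx)
        · exact Or.inr ⟨x, hx, hxx⟩

theorem pvBuckets_mem_keys (node : List String) (c : Char) :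
    c ∈ (pvBuckets node).keys ↔ ∃ w ∈ node, (pvPred w && (pvHeadC w == c)) = true := by
  rw [pvBuckets, pv_mem_keys_aux]
  simp [PySem.Dict.keys_empty]


theorem pv_lc_eq : "abcdefghijklmnopqrstuvwxyz".toList = ['a','b','c','d','e','f','g','h','i','j','k','l','m','n','o','p','q','r','s','t','u','v','w','x','y','z'] := rfl

theorem pv_mem_lc (c : Char) : c ∈ "abcdefghijklmnopqrstuvwxyz".toList ↔ ('a' ≤ c ∧ c ≤ 'z') := by
  constructor
  · intro h
    rw [pv_lc_eq] at h
    simp only [List.mem_cons, List.not_mem_nil, or_false] at h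
    rcases h with rfl|rfl|rfl|rfl|rfl|rfl|rfl|rfl|rfl|rfl|rfl|rfl|rfl|rfl|rfl|rfl|rfl|rfl|rfl|rfl|rfl|rfl|rfl|rfl|rfl|rfl <;> exact ⟨by decide, by decide⟩
  · rintro ⟨h1, h2⟩
    have hn1 : 97 ≤ c.toNat := by
      simpa [Char.le_def, UInt32.le_iff_toNat_le] using h1
    have hn2 : c.toNat ≤ 122 := by
      simpa [Char.le_def, UInt32.le_iff_toNat_le] using h2
    have hc : c = Char.ofNat c.toNat := (Char.ofNat_toNat c).symm
    rw [hc]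
    interval_cases h : c.toNat <;> decide

theorem pv_lc_pairwise : ("abcdefghijklmnopqrstuvwxyz".toList).Pairwise (· < ·) := by decide

theorem pv_pred_head_bounds (w : String) (h : pvPred w = true) :
    'a' ≤ pvHeadC w ∧ pvHeadC w ≤ 'z' := by
  unfold pvPred at h
  unfold pvHeadC
  cases hl : w.toList with
  | nil => rw [hl] at h; simp at h
  | cons a t => rw [hl] at h; simp at h; simpa using h

theorem pv_startswith_singleton (w : String) (c : Char) :
    PySem.Str.startswith w (String.singleton c) = ((!w.toList.isEmpty) && (pvHeadC w == c)) := by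
  rw [Bool.eq_iff_iff]
  rw [PySem.Str.startswith_eq, PySem.Chars.startswith_iff]
  cases hl : w.toList with
  | nil => simp
  | cons a t =>
    simp only [pvHeadC, hl, String.toList_singleton, List.cons_prefix_cons, List.isEmpty_cons,
      Bool.not_false, Bool.true_and, List.headI_cons, beq_iff_eq, List.nil_prefix, and_true]
    exact eq_comm

theorem pv_filter_startswith_eq (node : List String) (c : Char) (hc : 'a' ≤ c ∧ c ≤ 'z') :
    node.filter (fun x => PySem.Str.startswith x (String.singleton c))
      = node.filter (fun w => pvPred w && (pvHeadC w == c)) := by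
  apply List.filter_congr
  intro w _
  rw [pv_startswith_singleton]
  cases hl : w.toList with
  | nil => simp [pvPred, hl]
  | cons a t =>
    by_cases hac : a = c
    · subst hac
      simp [pvPred, pvHeadC, hl, hc.1, hc.2]
    · simp [pvPred, pvHeadC, hl, hac]

theorem pv_srl_eq_child (node : List String) (c : Char) (hc : 'a' ≤ c ∧ c ≤ 'z') :
    search_remaining_letters node (String.singleton c) = pvChild node c := by
  rw [pv_srl_singleton_eq]
  unfold pvChild search
  rw [pv_filter_startswith_eq node c hc]

theorem pv_child_nil_of_not_mem (node : List String) (c : Char)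
    (h : c ∉ (pvBuckets node).keys) : pvChild node c = [] := by
  unfold pvChild
  rw [List.filter_eq_nil_iff.mpr, List.map_nil]
  intro w hw hww
  exact h ((pvBuckets_mem_keys node c).mpr ⟨w, hw, hww⟩)

theorem pv_keys_lc (node : List String) (c : Char) (h : c ∈ (pvBuckets node).keys) :
    c ∈ "abcdefghijklmnopqrstuvwxyz".toList := by
  obtain ⟨w, _, hw⟩ := (pvBuckets_mem_keys node c).mp h
  simp only [Bool.and_eq_true, beq_iff_eq] at hw
  rw [pv_mem_lc]
  exact hw.2 ▸ pv_pred_head_bounds w hw.1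

theorem pv_rpGo_eq (d : List String) (h : d ≠ []) (p : String) (letters : List Char) :
    rpGo d h p letters
      = letters.flatMap (fun c =>
          remove_prefix (search_remaining_letters d (String.singleton c)) (p ++ String.singleton c)) := by
  induction letters with
  | nil => rw [rpGo]; simp
  | cons c rest ih => rw [rpGo]; simp [ih]

theorem pv_flatMap_congr {α β : Type} (l : List α) (f g : α → List β)
    (h : ∀ x ∈ l, f x = g x) : l.flatMap f = l.flatMap g := by
  induction l with
  | nil => simp
  | cons x t ih =>
    simp only [List.flatMap_cons, h x (by simp), ih (fun y hy => h y (by simp [hy]))]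

theorem pv_flatMap_filter {α β : Type} (l : List α) (q : α → Bool) (g : α → List β)
    (h : ∀ x ∈ l, q x = false → g x = []) : l.flatMap g = (l.filter q).flatMap g := by
  induction l with
  | nil => simp
  | cons x t ih =>
    have ht := ih (fun y hy => h y (by simp [hy]))
    cases hq : q x with
    | true => simp [hq, ht]
    | false => simp [hq, ← ht, h x (by simp) hq]

theorem pv_foldl_cons_eq {α β : Type} (l : List α) (f : α → β) (rest : List β) :
    l.foldl (fun st c => f c :: st) rest = l.reverse.map f ++ rest := by
  induction l generalizing rest with
  | nil => simp
  | cons c t ih => simp [List.foldl_cons, ih]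

theorem pv_sorted_keys (node : List String) :
    PySem.List.sorted (pvBuckets node).keys (fun x => x) true
      = ("abcdefghijklmnopqrstuvwxyz".toList.filter
          (fun c => decide (c ∈ (pvBuckets node).keys))).reverse := by
  apply PySem.List.sorted_rev_eq_of_perm_of_pairwise_gt
  · apply List.reverse_perm _ |>.trans
    rw [List.perm_ext_iff_of_nodup (List.Nodup.filter _ (by decide)) (pvBuckets_keys_nodup node)]
    intro c
    simp only [List.mem_filter, decide_eq_true_eq]
    exact ⟨fun h => h.2, fun h => ⟨pv_keys_lc node c h, h⟩⟩
  · rw [List.pairwise_reverse]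
    exact List.Pairwise.filter _ pv_lc_pairwise

theorem pvMeasure_eq_zero (node : List String) (h : pvMeasure node = 0) : node = [] := by
  cases node with
  | nil => rfl
  | cons w t => simp [pvMeasure] at h

theorem pv_remove_prefix_nil (p : String) : remove_prefix [] p = [] := by
  rw [remove_prefix]; simp

theorem pv_bLoop_step (n : Nat) : ∀ (node : List String) (p : String)
    (rest : List (List String × String)) (acc : List String), pvMeasure node ≤ n →
    bLoop ((node, p) :: rest) acc = bLoop rest (acc ++ remove_prefix node p) := by
  induction n with
  | zero =>
    intro node p rest acc hle
    have : node = [] := pvMeasure_eq_zero node (Nat.le_zero.mp hle)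
    subst this
    rw [bLoop, pv_remove_prefix_nil]
    simp
  | succ n ih =>
    intro node p rest acc hle
    by_cases hn : node = []
    · subst hn
      rw [bLoop, pv_remove_prefix_nil]
      simp
    · by_cases hh : node.headI = ""
      · rw [bLoop]
        simp only [hn, hh, if_pos, reduceDIte]
        rw [remove_prefix]
        have : ¬node.length = 0 := by simpa using hn
        simp [this, hh]
      · have hchild : ∀ c, pvMeasure ((pvBuckets node).getD c []) ≤ n := by
          intro c
          rw [pvBuckets_getD]
          have := pvMeasure_pvChild_lt node hn c
          omega
        have hinner : ∀ (cs : List Char) (acc' : List String),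
            bLoop ((cs.map (fun c => ((pvBuckets node).getD c [], p ++ String.singleton c))) ++ rest) acc'
              = bLoop rest (acc' ++ cs.flatMap (fun c =>
                  remove_prefix ((pvBuckets node).getD c []) (p ++ String.singleton c))) := by
          intro cs
          induction cs with
          | nil => intro acc'; simp
          | cons c ct ihc =>
            intro acc'
            rw [List.map_cons, List.cons_append,
              ih ((pvBuckets node).getD c []) (p ++ String.singleton c) _ acc' (hchild c),
              ihc, List.flatMap_cons, List.append_assoc]
        -- left side
        rw [bLoop]
        simp only [hn, dif_neg, hh, if_neg, not_false_iff]
        rw [pv_sorted_keys, pv_foldl_cons_eq, List.reverse_reverse]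
        rw [hinner _ acc]
        -- right side
        congr 1
        rw [remove_prefix]
        have hlen : ¬node.length = 0 := by simpa using hn
        simp only [hlen, hh, dif_neg, if_neg, not_false_iff]
        rw [pv_rpGo_eq]
        rw [pv_flatMap_filter "abcdefghijklmnopqrstuvwxyz".toList
            (fun c => decide (c ∈ (pvBuckets node).keys))
            _ (fun c hcl hq => by
              have hnm : c ∉ (pvBuckets node).keys := by simpa using hq
              rw [pv_srl_eq_child node c ((pv_mem_lc c).mp hcl),
                pv_child_nil_of_not_mem node c hnm, pv_remove_prefix_nil])]
        congr 1
        apply pv_flatMap_congr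
        intro c hc
        simp only [List.mem_filter, decide_eq_true_eq] at hc
        rw [pv_srl_eq_child node c ((pv_mem_lc c).mp hc.1), pvBuckets_getD]

theorem pv_main (dictionary : List String) (prefix_ : String) :
    remove_prefix dictionary prefix_ = remove_prefix_alt dictionary prefix_ := by
  rw [remove_prefix_alt,
    pv_bLoop_step (pvMeasure dictionary) dictionary prefix_ [] [] (Nat.le_refl _), bLoop]
  simp

-- ===== VERDICT (by name: the statement is the Claim_ definition above) =====
theorem remove_prefix_spec : Claim_equal_remove_prefix := by
  intro d p _
  exact (pv_main d p)
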